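-- pv_equiv track=rewrite | github.com/Riyami28/signals | src/collectors/serper_jobs.py | _is_job_url
-- ===== SOURCE A (Python) =====
-- _JOB_BOARD_DOMAINS = frozenset(
--     [
--         "linkedin.com/jobs",
--         "indeed.com",
--         "indeed.co",
--         "naukri.com",
--         "glassdoor.com",
--         "glassdoor.co",
--         "lever.co",
--         "greenhouse.io",
--         "workday.com",
--         "myworkdayjobs.com",
--         "ashbyhq.com",
--         "angel.co",
--         "wellfound.com",
--         "instahyre.com",
--         "cutshort.io",
--         "dice.com",
--         "monster.com",
--         "simplyhired.com",
--         "ziprecruiter.com",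
--         "hired.com",
--         "jobvite.com",
--         "smartrecruiters.com",
--         "icims.com",
--         "breezy.hr",
--         "recruitee.com",
--         "builtin.com",
--         "talent.com",
--         "bebee.com",
--         "foundit.in",
--         "founditgulf.com",
--         "shine.com",
--         "tealhq.com",
--         "jobzmall.com",
--         "ambitionbox.com",
--     ]
-- )
--
-- _CAREER_PATH_SEGMENTS = frozenset(
--     [
--         "/careers",
--         "/jobs/",
--         "/job/",
--         "/openings",
--         "/positions",
--         "/hiring",
--         "/vacancies",
--         "/apply",
--     ]
-- )
--
-- def _is_job_url(link: str) -> bool: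
--     """Check if a URL is from a known job board or a careers page."""
--     link_lower = link.lower()
--
--     # Check against known job board domains
--     for domain in _JOB_BOARD_DOMAINS:
--         if domain in link_lower:
--             return True
--
--     # Check for career-related path segments
--     for segment in _CAREER_PATH_SEGMENTS:
--         if segment in link_lower:
--             return True
--
--     return False
-- ===== SOURCE B (Python) =====
-- import re
--
-- _JOB_BOARD_DOMAINS = frozenset(
--     [
--         "linkedin.com/jobs",
--         "indeed.com",
--         "indeed.co",
--         "naukri.com",
--         "glassdoor.com",
--         "glassdoor.co",
--         "lever.co",
--         "greenhouse.io",
--         "workday.com",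
--         "myworkdayjobs.com",
--         "ashbyhq.com",
--         "angel.co",
--         "wellfound.com",
--         "instahyre.com",
--         "cutshort.io",
--         "dice.com",
--         "monster.com",
--         "simplyhired.com",
--         "ziprecruiter.com",
--         "hired.com",
--         "jobvite.com",
--         "smartrecruiters.com",
--         "icims.com",
--         "breezy.hr",
--         "recruitee.com",
--         "builtin.com",
--         "talent.com",
--         "bebee.com",
--         "foundit.in",
--         "founditgulf.com",
--         "shine.com",
--         "tealhq.com",
--         "jobzmall.com",
--         "ambitionbox.com",
--     ]
-- )
--
-- _CAREER_PATH_SEGMENTS = frozenset(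
--     [
--         "/careers",
--         "/jobs/",
--         "/job/",
--         "/openings",
--         "/positions",
--         "/hiring",
--         "/vacancies",
--         "/apply",
--     ]
-- )
--
-- # One compiled automaton for all patterns: a union of the escaped literals.
-- _JOB_PATTERN = re.compile(
--     "|".join(
--         re.escape(p) for p in sorted(_JOB_BOARD_DOMAINS | _CAREER_PATH_SEGMENTS)
--     )
-- )
--
--
-- def _is_job_url(link: str) -> bool:
--     """Check if a URL is from a known job board or a careers page."""
--     return _JOB_PATTERN.search(link.lower()) is not None
-- ===== Notes on version B (the rewrite author's own statement) =====
-- stated objective: idiomatic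
-- what changed: B compiles all ~42 patterns into a single union regex once and answers with one automaton-driven search over the lowercased URL, instead of A's ~42 independent Python-level substring scans.
import Mathlib
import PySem

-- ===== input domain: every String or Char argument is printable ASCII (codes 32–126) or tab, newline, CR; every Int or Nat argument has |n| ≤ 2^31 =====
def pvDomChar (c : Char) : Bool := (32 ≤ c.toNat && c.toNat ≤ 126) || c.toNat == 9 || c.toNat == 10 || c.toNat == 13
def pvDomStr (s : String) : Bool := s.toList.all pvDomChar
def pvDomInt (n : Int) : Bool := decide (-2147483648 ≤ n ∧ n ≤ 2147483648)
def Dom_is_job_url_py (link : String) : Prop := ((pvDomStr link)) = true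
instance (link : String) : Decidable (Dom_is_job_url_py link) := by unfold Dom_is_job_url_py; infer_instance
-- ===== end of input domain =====

-- B compiles all patterns once into a single union regex and answers with one search
-- over the lowercased URL, instead of A's ~42 independent substring scans (idiomatic).

-- ===== PORT A =====
def jobBoardDomains : List String :=
  ["linkedin.com/jobs", "indeed.com", "indeed.co", "naukri.com", "glassdoor.com",
   "glassdoor.co", "lever.co", "greenhouse.io", "workday.com", "myworkdayjobs.com",
   "ashbyhq.com", "angel.co", "wellfound.com", "instahyre.com", "cutshort.io",
   "dice.com", "monster.com", "simplyhired.com", "ziprecruiter.com", "hired.com",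
   "jobvite.com", "smartrecruiters.com", "icims.com", "breezy.hr", "recruitee.com",
   "builtin.com", "talent.com", "bebee.com", "foundit.in", "founditgulf.com",
   "shine.com", "tealhq.com", "jobzmall.com", "ambitionbox.com"]

def careerPathSegments : List String :=
  ["/careers", "/jobs/", "/job/", "/openings", "/positions", "/hiring", "/vacancies", "/apply"]

-- the two early-return for-loops of A become two List.any scans
def is_job_url_py (link : String) : Bool :=
  let linkLower := PySem.Str.lower link
  (jobBoardDomains.any (fun domain => PySem.Str.isIn domain linkLower)) ||
  (careerPathSegments.any (fun segment => PySem.Str.isIn segment linkLower))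

-- ===== PORT B =====
-- the compiled pattern source: '|'.join(re.escape(p) for p in sorted(all patterns))
def jobPatternSource : String :=
  "/apply|/careers|/hiring|/job/|/jobs/|/openings|/positions|/vacancies|ambitionbox\\.com|angel\\.co|ashbyhq\\.com|bebee\\.com|breezy\\.hr|builtin\\.com|cutshort\\.io|dice\\.com|foundit\\.in|founditgulf\\.com|glassdoor\\.co|glassdoor\\.com|greenhouse\\.io|hired\\.com|icims\\.com|indeed\\.co|indeed\\.com|instahyre\\.com|jobvite\\.com|jobzmall\\.com|lever\\.co|linkedin\\.com/jobs|monster\\.com|myworkdayjobs\\.com|naukri\\.com|recruitee\\.com|shine\\.com|simplyhired\\.com|smartrecruiters\\.com|talent\\.com|tealhq\\.com|wellfound\\.com|workday\\.com|ziprecruiter\\.com"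

-- a regex-escaped literal alternative: '\c' matches the character c itself
def unescapeAlt : List Char → List Char
  | [] => []
  | '\\' :: c :: rest => c :: unescapeAlt rest
  | c :: rest => c :: unescapeAlt rest

-- re.search of a union of escaped literals: try every start position left to right,
-- at each one try the alternatives in pattern order; 'is not None' = some match exists
def is_job_url_py_alt (link : String) : Bool :=
  let s := (PySem.Str.lower link).toList
  let alts := (PySem.Chars.splitOn jobPatternSource.toList ['|']).map unescapeAlt
  (List.range (s.length + 1)).any (fun i =>
    alts.any (fun alt => PySem.Chars.startswith (s.drop i) alt))

-- ===== PRECONDITION & SPEC =====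
def Spec_is_job_url_py (link : String) (out : Bool) : Prop := out = is_job_url_py_alt link
instance (link : String) (out : Bool) : Decidable (Spec_is_job_url_py link out) := by unfold Spec_is_job_url_py; infer_instance

-- ===== CLAIM (what is proved, stated in full; the proofs are below) =====
def Claim_equal_is_job_url_py : Prop := ∀ (link : String), Dom_is_job_url_py link → Spec_is_job_url_py link (is_job_url_py link)

-- ===== LEMMAS AND PROOFS =====

-- the parsed, unescaped alternatives of the compiled pattern, written out
def jobAlts : List (List Char) :=
  (PySem.Chars.splitOn jobPatternSource.toList ['|']).map unescapeAlt

-- the alternatives of the compiled pattern are exactly the sorted pattern names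
def sortedNames : List String :=
  ["/apply", "/careers", "/hiring", "/job/",
   "/jobs/", "/openings", "/positions", "/vacancies",
   "ambitionbox.com", "angel.co", "ashbyhq.com", "bebee.com",
   "breezy.hr", "builtin.com", "cutshort.io", "dice.com",
   "foundit.in", "founditgulf.com", "glassdoor.co", "glassdoor.com",
   "greenhouse.io", "hired.com", "icims.com", "indeed.co",
   "indeed.com", "instahyre.com", "jobvite.com", "jobzmall.com",
   "lever.co", "linkedin.com/jobs", "monster.com", "myworkdayjobs.com",
   "naukri.com", "recruitee.com", "shine.com", "simplyhired.com",
   "smartrecruiters.com", "talent.com", "tealhq.com", "wellfound.com",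
   "workday.com", "ziprecruiter.com"]

set_option maxRecDepth 8000 in
set_option maxHeartbeats 2000000 in
lemma jobAlts_eq : jobAlts = sortedNames.map String.toList := by decide

set_option maxRecDepth 8000 in
set_option maxHeartbeats 2000000 in
lemma sortedNames_perm : sortedNames.Perm (jobBoardDomains ++ careerPathSegments) := by decide

lemma jobAlts_mem_iff (p : List Char) :
    p ∈ jobAlts ↔ ∃ q ∈ jobBoardDomains ++ careerPathSegments, q.toList = p := by
  rw [jobAlts_eq, List.mem_map]
  exact ⟨fun ⟨q, hq, he⟩ => ⟨q, sortedNames_perm.mem_iff.mp hq, he⟩,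
         fun ⟨q, hq, he⟩ => ⟨q, sortedNames_perm.mem_iff.mpr hq, he⟩⟩

set_option maxRecDepth 8000 in
lemma jobAlts_ne_nil : ∀ p ∈ jobAlts, p ≠ [] := by
  rw [jobAlts_eq]; decide

-- a nonempty pattern occurs as a substring iff it starts at some position ≤ length
lemma isIn_iff_exists_startswith (p s : List Char) (hp : p ≠ []) :
    PySem.Chars.isIn p s = true ↔
      ∃ i < s.length + 1, PySem.Chars.startswith (s.drop i) p = true := by
  rw [← PySem.Chars.exists_prefix_drop_iff_isIn]
  constructor
  · rintro ⟨j, hj⟩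
    have hjl : j < s.length + 1 := by
      by_contra h
      rw [List.drop_eq_nil_of_le (by omega)] at hj
      exact hp (List.prefix_nil.mp hj)
    exact ⟨j, hjl, (PySem.Chars.startswith_iff _ _).mpr hj⟩
  · rintro ⟨i, _, hs⟩
    exact ⟨i, (PySem.Chars.startswith_iff _ _).mp hs⟩

-- ===== VERDICT (by name: the statement is the Claim_ definition above) =====
theorem is_job_url_py_spec : Claim_equal_is_job_url_py := by
  intro link _
  unfold Spec_is_job_url_py is_job_url_py is_job_url_py_alt
  rw [Bool.eq_iff_iff]
  simp only [Bool.or_eq_true, List.any_eq_true, PySem.Str.isIn_eq, List.mem_range]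
  constructor
  · rintro (⟨p, hpmem, hin⟩ | ⟨p, hpmem, hin⟩) <;>
    · have hmem : p.toList ∈ jobAlts := by
        rw [jobAlts_mem_iff]; exact ⟨p, by simp [hpmem], rfl⟩
      obtain ⟨i, hi, hs⟩ := (isIn_iff_exists_startswith p.toList _
        (jobAlts_ne_nil _ hmem)).mp hin
      exact ⟨i, hi, p.toList, hmem, hs⟩
  · rintro ⟨i, hi, p, hpmem, hs⟩
    obtain ⟨q, hq, hqp⟩ := (jobAlts_mem_iff p).mp hpmem
    subst hqp
    have hin := (isIn_iff_exists_startswith q.toList _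
        (jobAlts_ne_nil _ hpmem)).mpr ⟨i, hi, hs⟩
    rcases List.mem_append.mp hq with h | h
    · exact Or.inl ⟨q, h, hin⟩
    · exact Or.inr ⟨q, h, hin⟩
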